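-- pv_equiv track=rewrite | github.com/nicktfranklin/StructuredBandits | ClusteringModel/hypothesis.py | label_switch
-- ===== SOURCE A (Python) =====
-- def label_switch(assignments):
--     """ utility function that ensures the 0th block is always in cluster 0, the 1st
--     block is always in [0, 1], etc.  Prevents a label switching problem"""
--     set_k = set()
--     label_key = dict()
--     for k in assignments:
--         if k not in set_k:
--             label_key[k] = len(set_k)
--             set_k.add(k)
--     label_switched_assignments = [label_key[k] for k in assignments]
--     return label_switched_assignments
-- ===== SOURCE B (Python) =====
-- def label_switch(assignments):
--     """ utility function that ensures the 0th block is always in cluster 0, the 1st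
--     block is always in [0, 1], etc.  Prevents a label switching problem"""
--     # first-occurrence index of every value (reverse pass: earlier writes win last)
--     first = {}
--     for i, k in reversed(list(enumerate(assignments))):
--         first[k] = i
--     # rank the distinct values by their first-occurrence index
--     order = sorted(first, key=first.__getitem__)
--     rank = {k: r for r, k in enumerate(order)}
--     return [rank[k] for k in assignments]
-- ===== Notes on version B (the rewrite author's own statement) =====
-- stated objective: alternative
-- what changed: Instead of A's streaming set+dict counter, B computes each value's first-occurrence index in one reverse pass, sorts the distinct values by that index, and uses the resulting rank as the new label.
import Mathlib
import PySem

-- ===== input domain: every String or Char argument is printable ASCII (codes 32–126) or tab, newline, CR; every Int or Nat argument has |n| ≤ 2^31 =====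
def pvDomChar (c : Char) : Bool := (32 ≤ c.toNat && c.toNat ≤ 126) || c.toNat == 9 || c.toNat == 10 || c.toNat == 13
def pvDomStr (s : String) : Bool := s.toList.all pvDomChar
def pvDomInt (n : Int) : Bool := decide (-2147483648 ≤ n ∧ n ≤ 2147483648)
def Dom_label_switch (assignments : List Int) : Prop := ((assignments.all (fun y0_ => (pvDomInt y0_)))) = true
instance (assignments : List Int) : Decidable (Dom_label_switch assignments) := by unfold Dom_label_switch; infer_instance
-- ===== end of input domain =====

-- B replaces A's streaming set+dict relabelling by a rank computation: one reverse pass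
-- records each value's first-occurrence index, the distinct values are sorted by that
-- index, and each value's rank in that order is its new label (alternative algorithm).

-- ===== PORT A =====
-- final dict lookup label_key[k]: exact here via getD, since every k of assignments was
-- inserted as a key in the preceding loop (KeyError is unreachable)
def label_switch (assignments : List Int) : List Int :=
  let st := assignments.foldl
    (fun (st : PySem.Set Int × PySem.Dict Int Int) k =>
      if !(PySem.Set.contains st.1 k) then
        (PySem.Set.add st.1 k, st.2.insert k (PySem.Set.len st.1))
      else st)
    (PySem.Set.empty, PySem.Dict.empty)
  assignments.map (fun k => st.2.getD k 0)

-- ===== PORT B =====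
-- first[k] and rank[k] lookups are exact via getD: every looked-up key is present
def label_switch_alt (assignments : List Int) : List Int :=
  let first := ((PySem.List.enumerate assignments 0).reverse).foldl
    (fun (d : PySem.Dict Int Int) p => d.insert p.2 p.1) PySem.Dict.empty
  let order := PySem.List.sorted first.keys (fun k => first.getD k 0) false
  let rank := (PySem.List.enumerate order 0).foldl
    (fun (d : PySem.Dict Int Int) p => d.insert p.2 p.1) PySem.Dict.empty
  assignments.map (fun k => rank.getD k 0)

-- ===== PRECONDITION & SPEC =====
def Spec_label_switch (assignments : List Int) (out : List Int) : Prop := out = label_switch_alt assignments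
instance (assignments : List Int) (out : List Int) : Decidable (Spec_label_switch assignments out) := by unfold Spec_label_switch; infer_instance

-- ===== CLAIM (what is proved, stated in full; the proofs are below) =====
def Claim_equal_label_switch : Prop := ∀ (assignments : List Int), Dom_label_switch assignments → Spec_label_switch assignments (label_switch assignments)

-- ===== LEMMAS AND PROOFS =====

-- index of a fresh element appended at the end
theorem pvIdxOf_append_self (l : List Int) (a : Int) (h : a ∉ l) :
    (l ++ [a]).idxOf a = l.length := by
  induction l with
  | nil => simp
  | cons x t ih =>
    simp only [List.mem_cons, not_or] at h
    rw [List.cons_append, List.idxOf_cons_ne _ (Ne.symm h.1), ih h.2]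
    rfl

-- A's loop: the set component accumulates the distinct values in first-appearance
-- order, and the dict maps each of them to its index in that list
theorem pvA_run (xs : List Int) (S : List Int) (d : PySem.Dict Int Int)
    (hS : S.Nodup) (hd : ∀ k ∈ S, d.get? k = some ((S.idxOf k : Int))) :
    (xs.foldl
      (fun (st : PySem.Set Int × PySem.Dict Int Int) k =>
        if !(PySem.Set.contains st.1 k) then
          (PySem.Set.add st.1 k, st.2.insert k (PySem.Set.len st.1))
        else st) (S, d)).1 = PySem.Set.update S xs ∧
    ∀ k ∈ PySem.Set.update S xs,
      (xs.foldl
        (fun (st : PySem.Set Int × PySem.Dict Int Int) k =>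
          if !(PySem.Set.contains st.1 k) then
            (PySem.Set.add st.1 k, st.2.insert k (PySem.Set.len st.1))
          else st) (S, d)).2.get? k = some (((PySem.Set.update S xs).idxOf k : Int)) := by
  induction xs generalizing S d with
  | nil => exact ⟨rfl, hd⟩
  | cons x xs ih =>
    by_cases hm : x ∈ S
    · have hc : PySem.Set.contains S x = true := (PySem.Set.contains_iff S x).mpr hm
      have hupd : PySem.Set.update S (x :: xs) = PySem.Set.update S xs := by
        show PySem.Set.update (PySem.Set.add S x) xs = _
        rw [PySem.Set.add_of_mem hm]
      simp only [List.foldl_cons, hc, Bool.not_true, Bool.false_eq_true, hupd]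
      exact ih S d hS hd
    · have hc : PySem.Set.contains S x = false := by
        by_contra h
        exact hm ((PySem.Set.contains_iff S x).mp (by simpa using h))
      have hadd : PySem.Set.add S x = S ++ [x] := PySem.Set.add_of_not_mem hm
      have hupd : PySem.Set.update S (x :: xs) = PySem.Set.update (S ++ [x]) xs := by
        show PySem.Set.update (PySem.Set.add S x) xs = _
        rw [hadd]
      simp only [List.foldl_cons, hc, Bool.not_false, if_pos, hadd, PySem.Set.len_eq, hupd]
      refine ih (S ++ [x]) _ ?_ ?_
      · simp [List.nodup_append, hS]
        exact fun a ha he => hm (he ▸ ha)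
      · intro k hk
        rcases List.mem_append.mp hk with hkS | hkx
        · have hne : k ≠ x := fun he => hm (he ▸ hkS)
          rw [PySem.Dict.get?_insert_of_ne _ _ hne, hd k hkS,
            List.idxOf_append_of_mem hkS]
        · have hkx' : k = x := by simpa using hkx
          subst hkx'
          rw [PySem.Dict.get?_insert_self, pvIdxOf_append_self S k hm]

-- B's reverse pass: the dict maps every value of xs to its FIRST index (shifted by s)
theorem pvFirst_get (xs : List Int) (s : Int) (k : Int) :
    ((PySem.List.enumerate xs s).foldr
        (fun (p : Int × Int) (d : PySem.Dict Int Int) => d.insert p.2 p.1)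
        PySem.Dict.empty).get? k
      = if k ∈ xs then some (s + (xs.idxOf k : Int)) else none := by
  induction xs generalizing s with
  | nil => simp [PySem.List.enumerate_nil, PySem.Dict.get?_empty]
  | cons x t ih =>
    rw [PySem.List.enumerate_cons]
    simp only [List.foldr_cons]
    by_cases hkx : k = x
    · subst hkx
      rw [PySem.Dict.get?_insert_self]
      simp
    · rw [PySem.Dict.get?_insert_of_ne _ _ hkx, ih (s + 1)]
      by_cases hm : k ∈ t
      · rw [if_pos hm, if_pos (List.mem_cons_of_mem x hm),
          List.idxOf_cons_ne _ (Ne.symm hkx)]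
        congr 1
        push_cast
        ring
      · rw [if_neg hm, if_neg (by simp [hkx, hm])]

-- the distinct values in first-appearance order have strictly increasing first indices
theorem pvPairwise_idxOf (xs : List Int) :
    (PySem.Set.ofList xs).Pairwise (fun a b => xs.idxOf a < xs.idxOf b) := by
  induction xs using List.reverseRecOn with
  | nil => simp [PySem.Set.ofList]
  | append_singleton t x ih =>
    have hof : PySem.Set.ofList (t ++ [x]) = PySem.Set.add (PySem.Set.ofList t) x := by
      simp [PySem.Set.ofList_eq_foldl]
    by_cases hm : x ∈ t
    · have hmo : x ∈ PySem.Set.ofList t := by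
        rw [PySem.Set.mem_ofList]; exact hm
      rw [hof, PySem.Set.add_of_mem hmo]
      refine List.Pairwise.imp_of_mem (fun {a b} ha hb hab => ?_) ih
      have ha' : a ∈ t := by rw [← PySem.Set.mem_ofList (xs := t)]; exact ha
      have hb' : b ∈ t := by rw [← PySem.Set.mem_ofList (xs := t)]; exact hb
      rw [List.idxOf_append_of_mem ha', List.idxOf_append_of_mem hb']
      exact hab
    · have hmo : x ∉ PySem.Set.ofList t := by
        rw [PySem.Set.mem_ofList]; exact hm
      rw [hof, PySem.Set.add_of_not_mem hmo, List.pairwise_append]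
      refine ⟨List.Pairwise.imp_of_mem (fun {a b} ha hb hab => ?_) ih, by simp, ?_⟩
      · have ha' : a ∈ t := by rw [← PySem.Set.mem_ofList (xs := t)]; exact ha
        have hb' : b ∈ t := by rw [← PySem.Set.mem_ofList (xs := t)]; exact hb
        rw [List.idxOf_append_of_mem ha', List.idxOf_append_of_mem hb']
        exact hab
      · intro a ha b hb
        have ha' : a ∈ t := by rw [← PySem.Set.mem_ofList (xs := t)]; exact ha
        have hb' : b = x := by simpa using hb
        subst hb'
        rw [List.idxOf_append_of_mem ha', pvIdxOf_append_self t b hm]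
        exact List.idxOf_lt_length_of_mem ha'

-- B's rank pass over a duplicate-free list maps each element to its index
theorem pvRank_get (L : List Int) (hL : L.Nodup) (k : Int) (hk : k ∈ L) :
    ((PySem.List.enumerate L 0).foldl
        (fun (d : PySem.Dict Int Int) (p : Int × Int) => d.insert p.2 p.1)
        PySem.Dict.empty).get? k = some ((L.idxOf k : Int)) := by
  have hnd : ((PySem.List.enumerate L 0).map (·.2)).Nodup := by
    rw [PySem.List.map_snd_enumerate]; exact hL
  have hfresh : ∀ p ∈ PySem.List.enumerate L 0,
      (PySem.Dict.empty : PySem.Dict Int Int).contains p.2 = false := by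
    intro p _; exact PySem.Dict.contains_empty p.2
  have hitems := PySem.Dict.items_foldl_insert_fresh (l := PySem.List.enumerate L 0)
    (k := (·.2)) (v := (·.1)) (d := PySem.Dict.empty) hfresh hnd
  have hkeysnd : ((PySem.List.enumerate L 0).foldl
      (fun (d : PySem.Dict Int Int) (p : Int × Int) => d.insert p.2 p.1)
      PySem.Dict.empty).keys.Nodup := by
    exact PySem.Dict.nodup_keys_foldl_insert_key _ _ _ _ PySem.Dict.nodup_keys_empty
  beta_reduce at hitems
  refine PySem.Dict.get?_of_mem_items _ ?_ hkeysnd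
  rw [hitems]
  have hlt : L.idxOf k < L.length := List.idxOf_lt_length_of_mem hk
  have hmem : ((L.idxOf k : Int), k) ∈ PySem.List.enumerate L 0 := by
    rw [PySem.List.mem_enumerate_iff]
    exact ⟨L.idxOf k, hlt, by simp [List.getElem_idxOf]⟩
  have : (PySem.Dict.empty : PySem.Dict Int Int).items = [] := rfl
  rw [this, List.nil_append, List.mem_map]
  exact ⟨((L.idxOf k : Int), k), hmem, rfl⟩

-- ===== VERDICT (by name: the statement is the Claim_ definition above) =====
theorem label_switch_spec : Claim_equal_label_switch := by
  intro xs _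
  unfold Spec_label_switch label_switch label_switch_alt
  simp only []
  -- A's side
  obtain ⟨-, hA⟩ := pvA_run xs [] PySem.Dict.empty List.nodup_nil (by intro k hk; cases hk)
  rw [PySem.Set.update_nil_left] at hA
  -- B's side: the first-index dict
  have hfold : ((PySem.List.enumerate xs 0).reverse).foldl
      (fun (d : PySem.Dict Int Int) p => d.insert p.2 p.1) PySem.Dict.empty
      = (PySem.List.enumerate xs 0).foldr
          (fun (p : Int × Int) (d : PySem.Dict Int Int) => d.insert p.2 p.1)
          PySem.Dict.empty := List.foldl_reverse
  -- its keys: the distinct values (in last-appearance order)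
  have hkeys : (((PySem.List.enumerate xs 0).reverse).foldl
      (fun (d : PySem.Dict Int Int) p => d.insert p.2 p.1) PySem.Dict.empty).keys
      = PySem.Set.ofList xs.reverse := by
    rw [PySem.Dict.keys_foldl_insert_key]
    rw [PySem.Dict.keys_empty, PySem.Set.update_nil_left, List.map_reverse,
      PySem.List.map_snd_enumerate]
  -- the sorted order is exactly the first-appearance order
  have horder : PySem.List.sorted
      (((PySem.List.enumerate xs 0).reverse).foldl
        (fun (d : PySem.Dict Int Int) p => d.insert p.2 p.1) PySem.Dict.empty).keys
      (fun k => (((PySem.List.enumerate xs 0).reverse).foldl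
        (fun (d : PySem.Dict Int Int) p => d.insert p.2 p.1) PySem.Dict.empty).getD k 0)
      false = PySem.Set.ofList xs := by
    apply PySem.List.sorted_eq_of_perm_of_pairwise_lt
    · rw [hkeys]
      refine (List.perm_ext_iff_of_nodup (PySem.Set.nodup_ofList xs)
        (PySem.Set.nodup_ofList xs.reverse)).mpr ?_
      intro a
      rw [PySem.Set.mem_ofList, PySem.Set.mem_ofList, List.mem_reverse]
    · refine List.Pairwise.imp_of_mem (fun {a b} ha hb hab => ?_) (pvPairwise_idxOf xs)
      have ha' : a ∈ xs := by rw [← PySem.Set.mem_ofList (xs := xs)]; exact ha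
      have hb' : b ∈ xs := by rw [← PySem.Set.mem_ofList (xs := xs)]; exact hb
      rw [PySem.Dict.getD_eq_get?_getD, PySem.Dict.getD_eq_get?_getD, hfold,
        pvFirst_get xs 0 a, pvFirst_get xs 0 b, if_pos ha', if_pos hb']
      simpa using hab
  rw [horder]
  -- pointwise agreement of the two output maps
  simp only [PySem.Set.empty] at hA ⊢
  apply List.map_congr_left
  intro k hk
  have hkof : k ∈ PySem.Set.ofList xs := by rw [PySem.Set.mem_ofList]; exact hk
  rw [PySem.Dict.getD_eq_get?_getD, PySem.Dict.getD_eq_get?_getD, hA k hkof,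
    pvRank_get (PySem.Set.ofList xs) (PySem.Set.nodup_ofList xs) k hkof]
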